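-- pv_equiv track=rewrite | github.com/TusKANNy/seismic | scripts/run_experiments.py | shrink_name
-- ===== SOURCE A (Python) =====
-- def shrink_name(original_name):
--
--     replacement_dict = {
--         "clustering-algorithm": "c-a",
--         "centroid-fraction": "c-f",
--         "kmeans-pruning-factor": "k-p-f",
--         "kmeans-doc-cut": "k-d-c",
--         "pruning-strategy": "p-s"
--     }
--
--     final_name = original_name
--     for k,v in replacement_dict.items():
--         final_name = final_name.replace(k, v)
--     return final_name
-- ===== SOURCE B (Python) =====
-- REPLACEMENTS = [
--     ("clustering-algorithm", "c-a"),
--     ("centroid-fraction", "c-f"),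
--     ("kmeans-pruning-factor", "k-p-f"),
--     ("kmeans-doc-cut", "k-d-c"),
--     ("pruning-strategy", "p-s"),
-- ]
--
--
-- def shrink_name(original_name):
--     # Single left-to-right scan: at each position try the replacement keys in
--     # order; emit the abbreviation and jump over the key on a match, otherwise
--     # copy the character.  (No key overlaps another and no abbreviation can
--     # create a new key occurrence, so one pass equals A's five full passes.)
--     pieces = []
--     i = 0
--     n = len(original_name)
--     while i < n:
--         for key, val in REPLACEMENTS:
--             if original_name.startswith(key, i):
--                 pieces.append(val)
--                 i += len(key)
--                 break
--         else:
--             pieces.append(original_name[i])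
--             i += 1
--     return "".join(pieces)
-- ===== Notes on version B (the rewrite author's own statement) =====
-- stated objective: alternative
-- what changed: Replaces five sequential full-string .replace passes with a single left-to-right scan that tries the five keys in dictionary order at each position and jumps over a match; equivalence rests on the keys being overlap-free and the abbreviations creating no new key occurrence.
import Mathlib
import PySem

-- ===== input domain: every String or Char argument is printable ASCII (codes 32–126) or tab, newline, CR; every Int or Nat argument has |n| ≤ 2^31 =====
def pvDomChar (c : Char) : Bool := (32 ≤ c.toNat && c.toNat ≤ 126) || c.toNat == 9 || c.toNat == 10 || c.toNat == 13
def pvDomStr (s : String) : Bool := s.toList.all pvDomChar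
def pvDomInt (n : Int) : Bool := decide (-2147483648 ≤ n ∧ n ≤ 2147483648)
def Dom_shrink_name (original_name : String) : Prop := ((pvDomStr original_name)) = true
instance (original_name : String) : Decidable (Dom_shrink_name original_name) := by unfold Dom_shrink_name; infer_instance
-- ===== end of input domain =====

-- B replaces A's five sequential full-string .replace passes by a single left-to-right
-- scan trying the keys in dictionary order at each position (objective: alternative).

-- ===== PORT A =====
def shrink_name (original_name : String) : String :=
  let replacement_dict : PySem.Dict String String :=
    PySem.Dict.ofList
      [("clustering-algorithm", "c-a"),
       ("centroid-fraction", "c-f"),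
       ("kmeans-pruning-factor", "k-p-f"),
       ("kmeans-doc-cut", "k-d-c"),
       ("pruning-strategy", "p-s")]
  replacement_dict.items.foldl
    (fun final_name kv => PySem.Str.replace final_name kv.1 kv.2) original_name

-- ===== PORT B =====
-- the five keys / values as char lists (shared by B's table and the proofs)
def pvK1 : List Char := "clustering-algorithm".toList
def pvK2 : List Char := "centroid-fraction".toList
def pvK3 : List Char := "kmeans-pruning-factor".toList
def pvK4 : List Char := "kmeans-doc-cut".toList
def pvK5 : List Char := "pruning-strategy".toList
def pvV1 : List Char := "c-a".toList
def pvV2 : List Char := "c-f".toList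
def pvV3 : List Char := "k-p-f".toList
def pvV4 : List Char := "k-d-c".toList
def pvV5 : List Char := "p-s".toList

-- Source B's REPLACEMENTS table, as char lists (the scan works on code points).
def pvTable : List (List Char × List Char) :=
  [(pvK1, pvV1), (pvK2, pvV2), (pvK3, pvV3), (pvK4, pvV4), (pvK5, pvV5)]

-- Source B's inner `for key, val in REPLACEMENTS: if startswith(key, i)` loop:
-- first table entry whose key is a prefix of the remaining text.
def pvTryKeys : List (List Char × List Char) → List Char → Option (List Char × Nat)
  | [], _ => none
  | (k, v) :: rest, s => if k.isPrefixOf s then some (v, k.length) else pvTryKeys rest s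

-- Source B's while-loop over the string (index i = chars already consumed):
-- on a match emit the value and jump over the key, otherwise copy one char.
def pvMultiRep : List Char → List Char
  | [] => []
  | c :: t =>
    match pvTryKeys pvTable (c :: t) with
    | some (v, len) => v ++ pvMultiRep (t.drop (len - 1))
    | none => c :: pvMultiRep t
termination_by s => s.length
decreasing_by
  all_goals simp only [List.length_drop, List.length_cons]
  all_goals omega

def shrink_name_alt (original_name : String) : String :=
  String.ofList (pvMultiRep original_name.toList)

-- ===== PRECONDITION & SPEC =====
def Spec_shrink_name (original_name : String) (out : String) : Prop := out = shrink_name_alt original_name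
instance (original_name : String) (out : String) : Decidable (Spec_shrink_name original_name out) := by unfold Spec_shrink_name; infer_instance

-- ===== CLAIM (what is proved, stated in full; the proofs are below) =====
def Claim_equal_shrink_name : Prop := ∀ (original_name : String), Dom_shrink_name original_name → Spec_shrink_name original_name (shrink_name original_name)

-- ===== LEMMAS AND PROOFS =====

-- Clean recursive form of Python str.replace (old ≠ ""): replace the leftmost
-- occurrence of `old` by `new` and continue after it.
def pvRep (old new : List Char) : List Char → List Char
  | [] => []
  | c :: t =>
    if old.isPrefixOf (c :: t) then new ++ pvRep old new (t.drop (old.length - 1))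
    else c :: pvRep old new t
termination_by s => s.length
decreasing_by
  all_goals simp only [List.length_drop, List.length_cons]
  all_goals omega

-- `key` matches nowhere starting inside `blk`, whatever follows `blk` (Bool, decidable).
def pvBlocked (blk key : List Char) : Bool :=
  (List.range blk.length).all fun p =>
    (List.range key.length).any fun q =>
      decide (p + q < blk.length) && (blk[p+q]? != key[q]?)

def pvBlockedP (blk key : List Char) : Prop :=
  ∀ p, p < blk.length → ∃ q, q < key.length ∧ p + q < blk.length ∧ blk[p+q]? ≠ key[q]?

lemma pvBlocked_prop {blk key : List Char} (h : pvBlocked blk key = true) :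
    pvBlockedP blk key := by
  intro p hp
  simp only [pvBlocked, List.all_eq_true, List.mem_range] at h
  obtain ⟨q, hq, hcond⟩ := List.any_eq_true.mp (h p hp)
  rw [Bool.and_eq_true, decide_eq_true_iff, bne_iff_ne] at hcond
  exact ⟨q, List.mem_range.mp hq, hcond.1, hcond.2⟩

-- No suffix of `key'` and the value `v` are prefix-comparable: replacing by `v`
-- can neither contain `key'` nor start/continue an occurrence of it.
def pvSafe (key' v : List Char) : Bool :=
  (List.range key'.length).all fun j =>
    !(key'.drop j).isPrefixOf v && !v.isPrefixOf (key'.drop j)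

def pvSafeP (key' v : List Char) : Prop :=
  ∀ j, j < key'.length → ¬ (key'.drop j <+: v) ∧ ¬ (v <+: key'.drop j)

lemma pvSafe_prop {key' v : List Char} (h : pvSafe key' v = true) : pvSafeP key' v := by
  intro j hj
  simp only [pvSafe, List.all_eq_true, List.mem_range] at h
  have := h j hj
  rw [Bool.and_eq_true, Bool.not_eq_true', Bool.not_eq_true'] at this
  constructor
  · rw [← List.isPrefixOf_iff_prefix]; simp [this.1]
  · rw [← List.isPrefixOf_iff_prefix]; simp [this.2]

lemma pvBlocked_not_prefix {blk key : List Char} (hb : pvBlockedP blk key)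
    (hblk : blk ≠ []) (t : List Char) : ¬ key <+: blk ++ t := by
  intro hpre
  obtain ⟨q, hqk, hqb, hne⟩ := hb 0 (by cases blk <;> simp_all)
  apply hne
  simp only [Nat.zero_add] at hqb ⊢
  have h1 : (blk ++ t)[q]? = blk[q]? := by
    rw [List.getElem?_append_left hqb]
  have h2 : (blk ++ t)[q]? = key[q]? := by
    obtain ⟨r, hr⟩ := hpre
    rw [← hr, List.getElem?_append_left hqk]
  rw [← h1, h2]

lemma pvBlocked_tail {c : Char} {blk key : List Char} (hb : pvBlockedP (c :: blk) key) :
    pvBlockedP blk key := by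
  intro p hp
  obtain ⟨q, hqk, hqb, hne⟩ := hb (p + 1) (by simpa using Nat.succ_lt_succ hp)
  simp only [List.length_cons] at hqb
  exact ⟨q, hqk, by omega, by
    simpa [show p + 1 + q = (p + q) + 1 by omega] using hne⟩

lemma pvRep_skip (k v : List Char) {blk : List Char} (hb : pvBlockedP blk k) :
    ∀ t, pvRep k v (blk ++ t) = blk ++ pvRep k v t := by
  induction blk with
  | nil => intro t; simp
  | cons c blk' ih =>
    intro t
    have hnp : ¬ k.isPrefixOf (c :: (blk' ++ t)) = true := by
      rw [List.isPrefixOf_iff_prefix]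
      exact pvBlocked_not_prefix hb (by simp) t
    simp only [List.cons_append, pvRep, if_neg hnp]
    rw [ih (pvBlocked_tail hb)]

lemma pvRep_fire (k v X : List Char) (hk : k ≠ []) :
    pvRep k v (k ++ X) = v ++ pvRep k v X := by
  obtain ⟨d, k0, rfl⟩ := List.exists_cons_of_ne_nil hk
  have hpre : (d :: k0).isPrefixOf (d :: (k0 ++ X)) = true := by
    rw [List.isPrefixOf_iff_prefix]
    exact ⟨X, by simp⟩
  simp only [List.cons_append, pvRep, if_pos hpre]
  have hd : (k0 ++ X).drop ((d :: k0).length - 1) = X := by simp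
  rw [hd]

lemma pvDrop_succ_of_drop_cons {k' : List Char} {j : ℕ} {d : Char} {w' : List Char}
    (h : k'.drop j = d :: w') : k'.drop (j + 1) = w' := by
  have h2 := congrArg (List.drop 1) h
  rw [List.drop_drop] at h2
  simpa [Nat.add_comm] using h2

lemma pvRep_no_new (k v k' : List Char) (hs : pvSafeP k' v) :
    ∀ n s j, s.length ≤ n → j ≤ k'.length → ¬ (k'.drop j <+: s) →
      ¬ (k'.drop j <+: pvRep k v s) := by
  intro n
  induction n with
  | zero =>
    intro s j hlen _ hnp
    have hnil : s = [] := by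
      cases s with
      | nil => rfl
      | cons c t => simp at hlen
    subst hnil; simpa [pvRep] using hnp
  | succ n ih =>
    intro s j hlen hj hnp
    match s with
    | [] => simpa [pvRep] using hnp
    | c :: t =>
      have hjlt : j < k'.length := by
        by_contra h
        exact hnp (by simp [List.drop_eq_nil_of_le (le_of_not_gt h)])
      by_cases hp : k.isPrefixOf (c :: t) = true
      · simp only [pvRep, if_pos hp]
        intro hpre
        have hv : v <+: v ++ pvRep k v (t.drop (k.length - 1)) := List.prefix_append _ _
        rcases Nat.le_total (k'.drop j).length v.length with hle | hle
        · exact (hs j hjlt).1 (List.prefix_of_prefix_length_le hpre hv hle)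
        · exact (hs j hjlt).2 (List.prefix_of_prefix_length_le hv hpre hle)
      · simp only [pvRep, if_neg hp]
        intro hpre
        obtain ⟨d, w', hw⟩ := List.exists_cons_of_ne_nil
          (show k'.drop j ≠ [] by simp [List.drop_eq_nil_iff]; omega)
        rw [hw, List.cons_prefix_cons] at hpre
        obtain ⟨rfl, hpre'⟩ := hpre
        have hnt : ¬ (k'.drop (j + 1) <+: t) := by
          rw [pvDrop_succ_of_drop_cons hw]
          intro hcon
          exact hnp (by rw [hw]; exact List.cons_prefix_cons.mpr ⟨rfl, hcon⟩)
        exact ih t (j + 1) (by simpa using hlen)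
          (by omega) hnt (by rw [pvDrop_succ_of_drop_cons hw]; exact hpre')

lemma pvRep_no_new0 (k v k' : List Char) (hk : k ≠ []) (hs : pvSafeP k' v) {s : List Char}
    (h : ¬ (k' <+: s)) : ¬ (k' <+: pvRep k v s) := by
  simpa using pvRep_no_new k v k' hs s.length s 0 le_rfl (Nat.zero_le _)
    (by simpa using h)

lemma pvDrop_of_key_split {k r t : List Char} {c : Char} (hk : k ≠ [])
    (h : k ++ r = c :: t) : t.drop (k.length - 1) = r := by
  obtain ⟨d, k0, rfl⟩ := List.exists_cons_of_ne_nil hk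
  simp only [List.cons_append, List.cons.injEq] at h
  obtain ⟨rfl, rfl⟩ := h
  simp

-- A's chain of five sequential replaces equals B's one-pass scan.
lemma pvChain_eq_multi : ∀ (n : ℕ) (s : List Char), s.length ≤ n →
    pvRep pvK5 pvV5 (pvRep pvK4 pvV4 (pvRep pvK3 pvV3 (pvRep pvK2 pvV2 (pvRep pvK1 pvV1 s))))
      = pvMultiRep s := by
  intro n
  induction n with
  | zero =>
    intro s hlen
    have hnil : s = [] := by
      cases s with
      | nil => rfl
      | cons c t => simp at hlen
    subst hnil
    simp [pvRep, pvMultiRep]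
  | succ n ih =>
    intro s hlen
    match s with
    | [] => simp [pvRep, pvMultiRep]
    | c :: t =>
      have hlt : t.length ≤ n := by simpa using hlen
      by_cases h1 : pvK1.isPrefixOf (c :: t) = true
      · obtain ⟨r, hr⟩ := List.isPrefixOf_iff_prefix.mp h1
        have hm : pvTryKeys pvTable (c :: t) = some (pvV1, pvK1.length) := by
          simp only [pvTable, pvTryKeys]
          rw [if_pos h1]
        have hRHS : pvMultiRep (c :: t) = pvV1 ++ pvMultiRep (t.drop (pvK1.length - 1)) := by
          rw [pvMultiRep, hm]
        rw [pvDrop_of_key_split (by decide) hr] at hRHS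
        rw [← hr,
          pvRep_fire pvK1 pvV1 _ (by decide),
          pvRep_skip pvK2 pvV2 (pvBlocked_prop (by decide : pvBlocked pvV1 pvK2 = true)),
          pvRep_skip pvK3 pvV3 (pvBlocked_prop (by decide : pvBlocked pvV1 pvK3 = true)),
          pvRep_skip pvK4 pvV4 (pvBlocked_prop (by decide : pvBlocked pvV1 pvK4 = true)),
          pvRep_skip pvK5 pvV5 (pvBlocked_prop (by decide : pvBlocked pvV1 pvK5 = true)),
          ih r (by have := congrArg List.length hr; simp [pvK1] at this; omega)]
        rw [hr, hRHS]
      · by_cases h2 : pvK2.isPrefixOf (c :: t) = true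
        · obtain ⟨r, hr⟩ := List.isPrefixOf_iff_prefix.mp h2
          have hm : pvTryKeys pvTable (c :: t) = some (pvV2, pvK2.length) := by
            simp only [pvTable, pvTryKeys]
            rw [if_neg h1, if_pos h2]
          have hRHS : pvMultiRep (c :: t) = pvV2 ++ pvMultiRep (t.drop (pvK2.length - 1)) := by
            rw [pvMultiRep, hm]
          rw [pvDrop_of_key_split (by decide) hr] at hRHS
          rw [← hr,
            pvRep_skip pvK1 pvV1 (pvBlocked_prop (by decide : pvBlocked pvK2 pvK1 = true)),
            pvRep_fire pvK2 pvV2 _ (by decide),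
            pvRep_skip pvK3 pvV3 (pvBlocked_prop (by decide : pvBlocked pvV2 pvK3 = true)),
            pvRep_skip pvK4 pvV4 (pvBlocked_prop (by decide : pvBlocked pvV2 pvK4 = true)),
            pvRep_skip pvK5 pvV5 (pvBlocked_prop (by decide : pvBlocked pvV2 pvK5 = true)),
            ih r (by have := congrArg List.length hr; simp [pvK2] at this; omega)]
          rw [hr, hRHS]
        · by_cases h3 : pvK3.isPrefixOf (c :: t) = true
          · obtain ⟨r, hr⟩ := List.isPrefixOf_iff_prefix.mp h3
            have hm : pvTryKeys pvTable (c :: t) = some (pvV3, pvK3.length) := by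
              simp only [pvTable, pvTryKeys]
              rw [if_neg h1, if_neg h2, if_pos h3]
            have hRHS : pvMultiRep (c :: t) = pvV3 ++ pvMultiRep (t.drop (pvK3.length - 1)) := by
              rw [pvMultiRep, hm]
            rw [pvDrop_of_key_split (by decide) hr] at hRHS
            rw [← hr,
              pvRep_skip pvK1 pvV1 (pvBlocked_prop (by decide : pvBlocked pvK3 pvK1 = true)),
              pvRep_skip pvK2 pvV2 (pvBlocked_prop (by decide : pvBlocked pvK3 pvK2 = true)),
              pvRep_fire pvK3 pvV3 _ (by decide),
              pvRep_skip pvK4 pvV4 (pvBlocked_prop (by decide : pvBlocked pvV3 pvK4 = true)),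
              pvRep_skip pvK5 pvV5 (pvBlocked_prop (by decide : pvBlocked pvV3 pvK5 = true)),
              ih r (by have := congrArg List.length hr; simp [pvK3] at this; omega)]
            rw [hr, hRHS]
          · by_cases h4 : pvK4.isPrefixOf (c :: t) = true
            · obtain ⟨r, hr⟩ := List.isPrefixOf_iff_prefix.mp h4
              have hm : pvTryKeys pvTable (c :: t) = some (pvV4, pvK4.length) := by
                simp only [pvTable, pvTryKeys]
                rw [if_neg h1, if_neg h2, if_neg h3, if_pos h4]
              have hRHS : pvMultiRep (c :: t) = pvV4 ++ pvMultiRep (t.drop (pvK4.length - 1)) := by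
                rw [pvMultiRep, hm]
              rw [pvDrop_of_key_split (by decide) hr] at hRHS
              rw [← hr,
                pvRep_skip pvK1 pvV1 (pvBlocked_prop (by decide : pvBlocked pvK4 pvK1 = true)),
                pvRep_skip pvK2 pvV2 (pvBlocked_prop (by decide : pvBlocked pvK4 pvK2 = true)),
                pvRep_skip pvK3 pvV3 (pvBlocked_prop (by decide : pvBlocked pvK4 pvK3 = true)),
                pvRep_fire pvK4 pvV4 _ (by decide),
                pvRep_skip pvK5 pvV5 (pvBlocked_prop (by decide : pvBlocked pvV4 pvK5 = true)),
                ih r (by have := congrArg List.length hr; simp [pvK4] at this; omega)]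
              rw [hr, hRHS]
            · by_cases h5 : pvK5.isPrefixOf (c :: t) = true
              · obtain ⟨r, hr⟩ := List.isPrefixOf_iff_prefix.mp h5
                have hm : pvTryKeys pvTable (c :: t) = some (pvV5, pvK5.length) := by
                  simp only [pvTable, pvTryKeys]
                  rw [if_neg h1, if_neg h2, if_neg h3, if_neg h4, if_pos h5]
                have hRHS : pvMultiRep (c :: t) = pvV5 ++ pvMultiRep (t.drop (pvK5.length - 1)) := by
                  rw [pvMultiRep, hm]
                rw [pvDrop_of_key_split (by decide) hr] at hRHS
                rw [← hr,
                  pvRep_skip pvK1 pvV1 (pvBlocked_prop (by decide : pvBlocked pvK5 pvK1 = true)),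
                  pvRep_skip pvK2 pvV2 (pvBlocked_prop (by decide : pvBlocked pvK5 pvK2 = true)),
                  pvRep_skip pvK3 pvV3 (pvBlocked_prop (by decide : pvBlocked pvK5 pvK3 = true)),
                  pvRep_skip pvK4 pvV4 (pvBlocked_prop (by decide : pvBlocked pvK5 pvK4 = true)),
                  pvRep_fire pvK5 pvV5 _ (by decide),
                  ih r (by have := congrArg List.length hr; simp [pvK5] at this; omega)]
                rw [hr, hRHS]
              · -- no key matches at this position
                have e1 : pvRep pvK1 pvV1 (c :: t) = c :: pvRep pvK1 pvV1 t := by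
                  rw [pvRep, if_neg h1]
                have p2 : ¬ (pvK2 <+: pvRep pvK1 pvV1 (c :: t)) :=
                  pvRep_no_new0 pvK1 pvV1 pvK2 (by decide) (pvSafe_prop (by decide))
                      (by rw [← List.isPrefixOf_iff_prefix]; simpa using h2)
                have e2 : pvRep pvK2 pvV2 (pvRep pvK1 pvV1 (c :: t))
                    = c :: pvRep pvK2 pvV2 (pvRep pvK1 pvV1 (t)) := by
                  rw [e1] at p2 ⊢
                  rw [pvRep, if_neg (by rw [List.isPrefixOf_iff_prefix]; exact p2)]
                have p3 : ¬ (pvK3 <+: pvRep pvK2 pvV2 (pvRep pvK1 pvV1 (c :: t))) :=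
                  pvRep_no_new0 pvK2 pvV2 pvK3 (by decide) (pvSafe_prop (by decide))
                      (pvRep_no_new0 pvK1 pvV1 pvK3 (by decide) (pvSafe_prop (by decide))
                      (by rw [← List.isPrefixOf_iff_prefix]; simpa using h3))
                have e3 : pvRep pvK3 pvV3 (pvRep pvK2 pvV2 (pvRep pvK1 pvV1 (c :: t)))
                    = c :: pvRep pvK3 pvV3 (pvRep pvK2 pvV2 (pvRep pvK1 pvV1 (t))) := by
                  rw [e2] at p3 ⊢
                  rw [pvRep, if_neg (by rw [List.isPrefixOf_iff_prefix]; exact p3)]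
                have p4 : ¬ (pvK4 <+: pvRep pvK3 pvV3 (pvRep pvK2 pvV2 (pvRep pvK1 pvV1 (c :: t)))) :=
                  pvRep_no_new0 pvK3 pvV3 pvK4 (by decide) (pvSafe_prop (by decide))
                      (pvRep_no_new0 pvK2 pvV2 pvK4 (by decide) (pvSafe_prop (by decide))
                      (pvRep_no_new0 pvK1 pvV1 pvK4 (by decide) (pvSafe_prop (by decide))
                      (by rw [← List.isPrefixOf_iff_prefix]; simpa using h4)))
                have e4 : pvRep pvK4 pvV4 (pvRep pvK3 pvV3 (pvRep pvK2 pvV2 (pvRep pvK1 pvV1 (c :: t))))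
                    = c :: pvRep pvK4 pvV4 (pvRep pvK3 pvV3 (pvRep pvK2 pvV2 (pvRep pvK1 pvV1 (t)))) := by
                  rw [e3] at p4 ⊢
                  rw [pvRep, if_neg (by rw [List.isPrefixOf_iff_prefix]; exact p4)]
                have p5 : ¬ (pvK5 <+: pvRep pvK4 pvV4 (pvRep pvK3 pvV3 (pvRep pvK2 pvV2 (pvRep pvK1 pvV1 (c :: t))))) :=
                  pvRep_no_new0 pvK4 pvV4 pvK5 (by decide) (pvSafe_prop (by decide))
                      (pvRep_no_new0 pvK3 pvV3 pvK5 (by decide) (pvSafe_prop (by decide))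
                      (pvRep_no_new0 pvK2 pvV2 pvK5 (by decide) (pvSafe_prop (by decide))
                      (pvRep_no_new0 pvK1 pvV1 pvK5 (by decide) (pvSafe_prop (by decide))
                      (by rw [← List.isPrefixOf_iff_prefix]; simpa using h5))))
                have e5 : pvRep pvK5 pvV5 (pvRep pvK4 pvV4 (pvRep pvK3 pvV3 (pvRep pvK2 pvV2 (pvRep pvK1 pvV1 (c :: t)))))
                    = c :: pvRep pvK5 pvV5 (pvRep pvK4 pvV4 (pvRep pvK3 pvV3 (pvRep pvK2 pvV2 (pvRep pvK1 pvV1 (t))))) := by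
                  rw [e4] at p5 ⊢
                  rw [pvRep, if_neg (by rw [List.isPrefixOf_iff_prefix]; exact p5)]
                have hm : pvTryKeys pvTable (c :: t) = none := by
                  simp only [pvTable, pvTryKeys]
                  rw [if_neg h1, if_neg h2, if_neg h3, if_neg h4, if_neg h5]
                have hRHS : pvMultiRep (c :: t) = c :: pvMultiRep t := by
                  rw [pvMultiRep, hm]
                rw [e5, ih t hlt, hRHS]

-- PySem's fuel-based str.replace equals the clean recursion (old ≠ []).
lemma pvGo_eq_rep (old new : List Char) (hk : old ≠ []) :
    ∀ (fuel : ℕ) (l acc : List Char), l.length ≤ fuel →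
      PySem.Chars.replace.go old new fuel l acc = acc.reverse ++ pvRep old new l := by
  intro fuel
  induction fuel with
  | zero =>
    intro l acc hlen
    have : l = [] := by cases l with
      | nil => rfl
      | cons c t => simp at hlen
    subst this
    simp [PySem.Chars.replace.go, pvRep]
  | succ n ih =>
    intro l acc hlen
    match l with
    | [] => simp [PySem.Chars.replace.go, pvRep]
    | c :: t =>
      rw [PySem.Chars.replace.go]
      by_cases hp : old.isPrefixOf (c :: t) = true
      · rw [if_pos hp, pvRep, if_pos hp]
        have hlen' : (List.drop old.length (c :: t)).length ≤ n := by
          simp only [List.length_drop, List.length_cons]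
          have : 1 ≤ old.length := by cases old with
            | nil => exact absurd rfl hk
            | cons _ _ => simp
          simp at hlen
          omega
        rw [ih _ _ hlen']
        have : List.drop old.length (c :: t) = t.drop (old.length - 1) := by
          cases old with
          | nil => exact absurd rfl hk
          | cons d o0 => simp
        rw [this]
        simp
      · rw [if_neg hp, pvRep, if_neg hp]
        rw [ih t (c :: acc) (by simpa using hlen)]
        simp

lemma pvReplace_eq_rep (s old new : List Char) (hk : old ≠ []) :
    PySem.Chars.replace s old new = pvRep old new s := by
  rw [PySem.Chars.replace, if_neg (by simpa [List.isEmpty_iff] using hk)]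
  simpa using pvGo_eq_rep old new hk s.length s [] le_rfl

-- ===== VERDICT (by name: the statement is the Claim_ definition above) =====
theorem shrink_name_spec : Claim_equal_shrink_name := by
  intro s _
  unfold Spec_shrink_name shrink_name_alt
  have hA : shrink_name s =
      PySem.Str.replace (PySem.Str.replace (PySem.Str.replace (PySem.Str.replace
        (PySem.Str.replace s "clustering-algorithm" "c-a")
        "centroid-fraction" "c-f") "kmeans-pruning-factor" "k-p-f")
        "kmeans-doc-cut" "k-d-c") "pruning-strategy" "p-s" := rfl
  have hlist : (shrink_name s).toList = pvMultiRep s.toList := by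
    rw [hA]
    simp only [PySem.Str.toList_replace]
    rw [pvReplace_eq_rep _ _ _ (by decide),
        pvReplace_eq_rep _ _ _ (by decide),
        pvReplace_eq_rep _ _ _ (by decide),
        pvReplace_eq_rep _ _ _ (by decide),
        pvReplace_eq_rep _ _ _ (by decide)]
    exact pvChain_eq_multi s.toList.length s.toList le_rfl
  have h2 : (shrink_name s).toList = (String.ofList (pvMultiRep s.toList)).toList := by
    rw [String.toList_ofList]; exact hlist
  exact String.toList_injective h2
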